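-- pv_equiv track=rewrite | github.com/AllenCellModeling/aicsimageio | aicsimageio/readers/tiff_reader.py | _merge_dim_guesses
-- ===== SOURCE A (Python) =====
-- UNKNOWN_DIM_CHAR = "Q"
--
-- def _merge_dim_guesses(dims_from_meta: str, guessed_dims: str) -> str:
--     # Construct a "best guess" (super naive)
--     best_guess = []
--     for dim_from_meta in dims_from_meta:
--         # Dim from meta is recognized, add it
--         if dim_from_meta != UNKNOWN_DIM_CHAR:
--             best_guess.append(dim_from_meta)
--
--         # Dim from meta isn't recognized
--         # Find next dim that isn't already in best guess or dims from meta
--         else: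
--             appended_dim = False
--             for guessed_dim in guessed_dims:
--                 if (
--                     guessed_dim not in best_guess
--                     and guessed_dim not in dims_from_meta
--                 ):
--                     best_guess.append(guessed_dim)
--                     appended_dim = True
--                     break
--
--             # All of our guess dims were already in the best guess list,
--             # append the dim read from meta
--             if not appended_dim:
--                 best_guess.append(dim_from_meta)
--
--     return "".join(best_guess)
-- ===== SOURCE B (Python) =====
-- UNKNOWN_DIM_CHAR = "Q"
--
-- def _merge_dim_guesses(dims_from_meta: str, guessed_dims: str) -> str:
--     # Build once: ordered, first-occurrence pool of guessed dims absent from meta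
--     seen = set()
--     pool = []
--     for c in guessed_dims:
--         if c not in seen and c not in dims_from_meta:
--             seen.add(c)
--             pool.append(c)
--     pool_iter = iter(pool)
--     out = []
--     for c in dims_from_meta:
--         if c != UNKNOWN_DIM_CHAR:
--             out.append(c)
--         else:
--             out.append(next(pool_iter, UNKNOWN_DIM_CHAR))
--     return "".join(out)
-- ===== Notes on version B (the rewrite author's own statement) =====
-- stated objective: simpler
-- what changed: Replaces the nested rescan of guessed_dims on every unknown meta dim by a pool of unused guessed dims built once and consumed left-to-right in a single pass over dims_from_meta.
import Mathlib
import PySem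

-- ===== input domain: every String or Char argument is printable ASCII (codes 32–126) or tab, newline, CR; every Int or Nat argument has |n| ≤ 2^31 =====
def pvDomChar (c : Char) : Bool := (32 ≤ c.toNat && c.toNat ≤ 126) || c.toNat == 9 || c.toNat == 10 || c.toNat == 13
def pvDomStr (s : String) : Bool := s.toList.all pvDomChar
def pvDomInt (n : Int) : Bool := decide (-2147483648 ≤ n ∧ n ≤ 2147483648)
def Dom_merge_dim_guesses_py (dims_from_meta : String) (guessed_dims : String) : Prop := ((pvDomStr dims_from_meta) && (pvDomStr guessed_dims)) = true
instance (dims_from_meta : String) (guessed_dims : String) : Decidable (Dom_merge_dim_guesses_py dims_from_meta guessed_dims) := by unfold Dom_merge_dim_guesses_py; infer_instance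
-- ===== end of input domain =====

-- B replaces A's inner rescan of guessed_dims by a pool of unused guessed dims
-- built once and consumed left-to-right in one pass (objective: simpler).

-- ===== PORT A =====
-- inner 'for guessed_dim in guessed_dims: … break' loop with its appended_dim flag,
-- rendered as first-match search (none = flag stayed False)
def pvFirstNew (guessed : List Char) (best : List Char) (mt : List Char) : Option Char :=
  match guessed with
  | [] => none
  | gd :: rest =>
      if gd ∉ best ∧ gd ∉ mt then some gd
      else pvFirstNew rest best mt

def merge_dim_guesses_py (dims_from_meta : String) (guessed_dims : String) : String :=
  String.ofList (dims_from_meta.toList.foldl (fun best c =>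
    if c ≠ 'Q' then best ++ [c]
    else
      match pvFirstNew guessed_dims.toList best dims_from_meta.toList with
      | some gd => best ++ [gd]
      | none => best ++ [c]) [])

-- ===== PORT B =====
-- pool build: one pass over guessed_dims with a seen-set
def pvBuildPool (guessed : List Char) (mt : List Char) : PySem.Set Char × List Char :=
  guessed.foldl (fun sp c =>
    if c ∉ sp.1 ∧ c ∉ mt then (PySem.Set.add sp.1 c, sp.2 ++ [c]) else sp)
    (PySem.Set.empty, [])

-- main pass: consume the pool iterator, 'Q' when exhausted
def pvConsume (ms : List Char) (pool : List Char) (out : List Char) : List Char :=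
  match ms with
  | [] => out
  | c :: rest =>
      if c ≠ 'Q' then pvConsume rest pool (out ++ [c])
      else
        match pool with
        | [] => pvConsume rest [] (out ++ ['Q'])
        | p :: ps => pvConsume rest ps (out ++ [p])

def merge_dim_guesses_py_alt (dims_from_meta : String) (guessed_dims : String) : String :=
  String.ofList (pvConsume dims_from_meta.toList
    (pvBuildPool guessed_dims.toList dims_from_meta.toList).2 [])

-- ===== PRECONDITION & SPEC =====
def Spec_merge_dim_guesses_py (dims_from_meta : String) (guessed_dims : String) (out : String) : Prop := out = merge_dim_guesses_py_alt dims_from_meta guessed_dims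
instance (dims_from_meta : String) (guessed_dims : String) (out : String) : Decidable (Spec_merge_dim_guesses_py dims_from_meta guessed_dims out) := by unfold Spec_merge_dim_guesses_py; infer_instance

-- ===== CLAIM (what is proved, stated in full; the proofs are below) =====
def Claim_equal_merge_dim_guesses_py : Prop := ∀ (dims_from_meta : String) (guessed_dims : String), Dom_merge_dim_guesses_py dims_from_meta guessed_dims → Spec_merge_dim_guesses_py dims_from_meta guessed_dims (merge_dim_guesses_py dims_from_meta guessed_dims)

-- ===== LEMMAS AND PROOFS =====

-- the "remaining pool" of A's state: guessed chars not yet used (not in best) and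
-- not in mt, first occurrences in order
def pvPoolP (guessed : List Char) (mt : List Char) (best : List Char) : List Char :=
  match guessed with
  | [] => []
  | g :: gs =>
      if g ∈ best ∨ g ∈ mt then pvPoolP gs mt best
      else g :: pvPoolP gs mt (g :: best)

theorem pvPoolP_congr (guessed mt : List Char) (b1 b2 : List Char)
    (h : ∀ x, x ∈ b1 ↔ x ∈ b2) : pvPoolP guessed mt b1 = pvPoolP guessed mt b2 := by
  induction guessed generalizing b1 b2 with
  | nil => rfl
  | cons g gs ih =>
    simp only [pvPoolP, h g]
    split_ifs with hg
    · exact ih b1 b2 h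
    · exact congrArg _ (ih _ _ (by intro x; simp [h x]))

theorem pvPoolP_cons_mem (guessed mt : List Char) (c : Char) (best : List Char)
    (hc : c ∈ mt) : pvPoolP guessed mt (c :: best) = pvPoolP guessed mt best := by
  induction guessed generalizing best with
  | nil => rfl
  | cons g gs ih =>
    simp only [pvPoolP, List.mem_cons]
    have : (g = c ∨ g ∈ best) ∨ g ∈ mt ↔ g ∈ best ∨ g ∈ mt := by
      constructor
      · rintro (⟨rfl | h⟩ | h) <;> simp_all
      · tauto
    rw [if_congr this rfl rfl]
    split_ifs with hg
    · exact ih best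
    · refine congrArg _ ?_
      calc pvPoolP gs mt (g :: c :: best)
          = pvPoolP gs mt (c :: g :: best) := pvPoolP_congr _ _ _ _ (by intro x; simp; tauto)
        _ = pvPoolP gs mt (g :: best) := ih _

theorem pvPoolP_append_mem (guessed mt : List Char) (best : List Char) (c : Char)
    (hc : c ∈ mt) : pvPoolP guessed mt (best ++ [c]) = pvPoolP guessed mt best := by
  calc pvPoolP guessed mt (best ++ [c])
      = pvPoolP guessed mt (c :: best) := pvPoolP_congr _ _ _ _ (by intro x; simp; tauto)
    _ = pvPoolP guessed mt best := pvPoolP_cons_mem _ _ _ _ hc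

theorem pvFirstNew_eq_head (guessed mt best : List Char) :
    pvFirstNew guessed best mt = (pvPoolP guessed mt best).head? := by
  induction guessed with
  | nil => rfl
  | cons g gs ih =>
    simp only [pvFirstNew, pvPoolP]
    by_cases hb : g ∈ best <;> by_cases hm : g ∈ mt <;> simp [hb, hm, ih]

theorem pvPoolP_tail (guessed mt best : List Char) (p : Char) (ps : List Char)
    (h : pvPoolP guessed mt best = p :: ps) :
    pvPoolP guessed mt (best ++ [p]) = ps := by
  induction guessed generalizing best with
  | nil => simp [pvPoolP] at h
  | cons g gs ih =>
    simp only [pvPoolP] at h ⊢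
    have : g ∈ best ++ [p] ∨ g ∈ mt ↔ (g = p ∨ g ∈ best) ∨ g ∈ mt := by
      simp; tauto
    rw [if_congr this rfl rfl]
    split_ifs at h with hg
    · rw [if_pos (by tauto)]
      exact ih best h
    · rw [not_or] at hg
      injection h with h1 h2
      subst h1
      rw [if_pos (Or.inl (Or.inl rfl))]
      calc pvPoolP gs mt (best ++ [g])
          = pvPoolP gs mt (g :: best) := pvPoolP_congr _ _ _ _ (by intro x; simp; tauto)
        _ = ps := h2

-- pool build computes pvPoolP from scratch
theorem pvBuildPool_go (guessed mt : List Char) (seen : PySem.Set Char)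
    (pool best : List Char) (hsb : ∀ x, x ∈ seen ↔ x ∈ best) :
    (guessed.foldl (fun sp c =>
      if c ∉ sp.1 ∧ c ∉ mt then (PySem.Set.add sp.1 c, sp.2 ++ [c]) else sp)
      (seen, pool)).2 = pool ++ pvPoolP guessed mt best := by
  induction guessed generalizing seen pool best with
  | nil => simp [pvPoolP]
  | cons g gs ih =>
    simp only [List.foldl_cons, pvPoolP]
    by_cases hm : g ∈ mt
    · rw [if_neg (by simp [hm]), if_pos (Or.inr hm)]
      exact ih seen pool best hsb
    · by_cases hs : g ∈ seen
      · rw [if_neg (by simp [hs]), if_pos (Or.inl ((hsb g).mp hs))]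
        exact ih seen pool best hsb
      · rw [if_pos ⟨hs, hm⟩, if_neg (by rw [← hsb g] at *; tauto)]
        rw [ih (PySem.Set.add seen g) (pool ++ [g]) (g :: best)
          (by intro x; simp [PySem.Set.mem_add, hsb x]; tauto)]
        simp

theorem pvBuildPool_eq (guessed mt : List Char) :
    (pvBuildPool guessed mt).2 = pvPoolP guessed mt [] := by
  have := pvBuildPool_go guessed mt PySem.Set.empty [] []
    (by intro x; simp [PySem.Set.empty])
  simpa [pvBuildPool] using this

-- main invariant: A's loop over the rest of mt, from state best, equals B's
-- consume pass over the remaining pool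
theorem pvMain (ms : List Char) (mt guessed best : List Char)
    (hms : ∀ c ∈ ms, c ∈ mt) :
    ms.foldl (fun best c =>
      if c ≠ 'Q' then best ++ [c]
      else
        match pvFirstNew guessed best mt with
        | some gd => best ++ [gd]
        | none => best ++ [c]) best
    = pvConsume ms (pvPoolP guessed mt best) best := by
  induction ms generalizing best with
  | nil => rfl
  | cons c rest ih =>
    have hc : c ∈ mt := hms c (List.mem_cons_self ..)
    have hrest : ∀ x ∈ rest, x ∈ mt := fun x hx => hms x (List.mem_cons_of_mem _ hx)
    simp only [List.foldl_cons, pvConsume]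
    by_cases hq : c ≠ 'Q'
    · rw [if_pos hq, if_pos hq, ih _ hrest, pvPoolP_append_mem _ _ _ _ hc]
    · rw [not_not] at hq
      subst hq
      rw [if_neg (by simp), if_neg (by simp), pvFirstNew_eq_head]
      cases hp : pvPoolP guessed mt best with
      | nil =>
        simp only [List.head?_nil]
        rw [ih _ hrest, pvPoolP_append_mem _ _ _ _ hc, hp]
      | cons p ps =>
        simp only [List.head?_cons]
        rw [ih _ hrest, pvPoolP_tail _ _ _ _ _ hp]

-- ===== VERDICT (by name: the statement is the Claim_ definition above) =====
theorem merge_dim_guesses_py_spec : Claim_equal_merge_dim_guesses_py := by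
  intro m g _
  show merge_dim_guesses_py m g = merge_dim_guesses_py_alt m g
  unfold merge_dim_guesses_py merge_dim_guesses_py_alt
  rw [pvBuildPool_eq, pvMain m.toList m.toList g.toList [] (fun _ h => h)]
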